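-- pv_equiv track=rewrite | github.com/rntk/txt-map | lib/tasks/topic_extraction.py | normalize_topic_ranges
-- ===== SOURCE A (Python) =====
-- from typing import List, Tuple, Dict, Set, Optional
--
-- def normalize_topic_ranges(topic_ranges: List[Tuple[str, int, int]], max_index: int) -> List[Tuple[str, int, int]]:
--     """
--     Clamp, order, and fill gaps to ensure continuous coverage.
--     Uses 0-based sentence indices.
--     """
--     if not topic_ranges:
--         return []
--
--     cleaned = []
--     for topic, start, end in topic_ranges:
--         start = max(0, min(start, max_index))
--         end = max(0, min(end, max_index))
--         if start > end:
--             start, end = end, start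
--         cleaned.append((topic, start, end))
--
--     cleaned.sort(key=lambda x: (x[1], x[2]))
--     normalized = []
--     current = 0
--
--     for topic, start, end in cleaned:
--         if end < current:
--             continue
--         if start > current:
--             normalized.append(("no_topic", current, start - 1))
--         start = max(start, current)
--         normalized.append((topic, start, end))
--         current = end + 1
--         if current > max_index:
--             break
--
--     if current <= max_index:
--         normalized.append(("no_topic", current, max_index))
--
--     return normalized
-- ===== SOURCE B (Python) =====
-- from itertools import accumulate
--
-- def normalize_topic_ranges(topic_ranges, max_index):
--     if not topic_ranges:
--         return []
--
--     def clamp(v):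
--         return max(0, min(v, max_index))
--
--     cleaned = sorted(
--         ((t, min(clamp(s), clamp(e)), max(clamp(s), clamp(e))) for t, s, e in topic_ranges),
--         key=lambda x: (x[1], x[2]),
--     )
--
--     # prefix maxima of the ends seen before each range; a range survives iff it
--     # reaches past everything before it, trimmed to start after the covered part
--     prev_max = accumulate((e for _, _, e in cleaned), max, initial=-1)
--     kept = [(t, max(s, m + 1), e)
--             for (t, s, e), m in zip(cleaned, prev_max) if e > m]
--
--     # interleave gap fillers by zipping each kept block with the bound before it
--     bounds = [0] + [e + 1 for _, _, e in kept]
--     out = [piece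
--            for (t, s, e), p in zip(kept, bounds)
--            for piece in ((("no_topic", p, s - 1),) if s > p else ()) + (((t, s, e)),)]
--     if bounds[-1] <= max_index:
--         out.append(("no_topic", bounds[-1], max_index))
--     return out
-- ===== Notes on version B (the rewrite author's own statement) =====
-- stated objective: alternative
-- what changed: A's single stateful sweep carrying a `current` cursor that skips, trims, gap-fills and breaks inline is replaced by a dataflow pipeline: prefix maxima of ends (itertools.accumulate) with a zip-filter comprehension select and trim the surviving blocks, then gaps are interleaved by zipping each block with the bound derived from its predecessor's end.
import Mathlib
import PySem

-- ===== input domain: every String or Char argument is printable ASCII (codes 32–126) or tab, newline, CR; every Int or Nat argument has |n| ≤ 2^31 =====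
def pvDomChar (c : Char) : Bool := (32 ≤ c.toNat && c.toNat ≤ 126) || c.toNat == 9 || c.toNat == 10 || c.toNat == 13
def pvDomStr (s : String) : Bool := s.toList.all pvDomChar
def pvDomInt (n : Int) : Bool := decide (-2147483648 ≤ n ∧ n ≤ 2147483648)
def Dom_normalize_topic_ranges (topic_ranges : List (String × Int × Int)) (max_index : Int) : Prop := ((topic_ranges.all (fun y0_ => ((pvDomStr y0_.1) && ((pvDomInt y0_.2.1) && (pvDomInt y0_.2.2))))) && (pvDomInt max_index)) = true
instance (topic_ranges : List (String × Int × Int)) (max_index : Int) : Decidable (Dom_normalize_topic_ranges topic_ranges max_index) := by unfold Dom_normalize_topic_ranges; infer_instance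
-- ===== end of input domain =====

-- B replaces A's single stateful sweep (cursor with skip/trim/gap/break) by a dataflow
-- pipeline: prefix maxima of ends → filter/trim comprehension → gaps interleaved by
-- zipping blocks with shifted bounds (objective: alternative decomposition, same cost).

-- ===== PORT A =====
def pvClamp (M v : Int) : Int := max 0 (min v M)

-- A's cleaning loop: append clamped (and swapped if reversed) triples
def pvCleanA (M : Int) (l : List (String × Int × Int)) : List (String × Int × Int) :=
  l.foldl (fun acc r =>
    let s := pvClamp M r.2.1
    let e := pvClamp M r.2.2
    if s > e then acc ++ [(r.1, e, s)] else acc ++ [(r.1, s, e)]) []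

-- A's main loop over the sorted cleaned list, carrying `current`; the `break`
-- (current > max_index) returns at once — the post-loop tail test is false there
def pvLoopA (M : Int) : List (String × Int × Int) → Int → List (String × Int × Int)
  | [], cur => if cur ≤ M then [(("no_topic" : String), cur, M)] else []
  | (t, s, e) :: rest, cur =>
    if e < cur then pvLoopA M rest cur
    else
      (if s > cur then [(("no_topic" : String), cur, s - 1)] else []) ++
      (if e + 1 > M then [(t, max s cur, e)]
       else (t, max s cur, e) :: pvLoopA M rest (e + 1))

def normalize_topic_ranges (topic_ranges : List (String × Int × Int)) (max_index : Int) : List (String × Int × Int) :=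
  if topic_ranges = [] then []
  else pvLoopA max_index
    (PySem.List.sorted2 (pvCleanA max_index topic_ranges) (fun x => x.2.1) (fun x => x.2.2)) 0

-- ===== PORT B =====
-- B's cleaning comprehension: (topic, min of clamps, max of clamps)
def pvCleanB (M : Int) (l : List (String × Int × Int)) : List (String × Int × Int) :=
  l.map (fun r =>
    (r.1, min (pvClamp M r.2.1) (pvClamp M r.2.2), max (pvClamp M r.2.1) (pvClamp M r.2.2)))

-- kept = [(t, max(s, m+1), e) for (t,s,e), m in zip(cleaned, accumulate(ends, max, initial=-1)) if e > m]
def pvKept (cleaned : List (String × Int × Int)) : List (String × Int × Int) :=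
  (cleaned.zip (List.scanl (fun m e => max m e) (-1) (cleaned.map (fun r => r.2.2)))).filterMap
    (fun p => if p.1.2.2 > p.2 then some (p.1.1, max p.1.2.1 (p.2 + 1), p.1.2.2) else none)

def normalize_topic_ranges_alt (topic_ranges : List (String × Int × Int)) (max_index : Int) : List (String × Int × Int) :=
  if topic_ranges = [] then []
  else
    let cleaned := PySem.List.sorted2 (pvCleanB max_index topic_ranges) (fun x => x.2.1) (fun x => x.2.2)
    let kept := pvKept cleaned
    let bounds : List Int := 0 :: kept.map (fun r => r.2.2 + 1)
    ((kept.zip bounds).flatMap (fun p =>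
        (if p.1.2.1 > p.2 then [(("no_topic" : String), p.2, p.1.2.1 - 1)] else []) ++ [p.1])) ++
    (if bounds.getLastD 0 ≤ max_index then [(("no_topic" : String), bounds.getLastD 0, max_index)] else [])

-- ===== PRECONDITION & SPEC =====
def Spec_normalize_topic_ranges (topic_ranges : List (String × Int × Int)) (max_index : Int) (out : List (String × Int × Int)) : Prop := out = normalize_topic_ranges_alt topic_ranges max_index
instance (topic_ranges : List (String × Int × Int)) (max_index : Int) (out : List (String × Int × Int)) : Decidable (Spec_normalize_topic_ranges topic_ranges max_index out) := by unfold Spec_normalize_topic_ranges; infer_instance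

-- ===== CLAIM (what is proved, stated in full; the proofs are below) =====
def Claim_equal_normalize_topic_ranges : Prop := ∀ (topic_ranges : List (String × Int × Int)) (max_index : Int), Dom_normalize_topic_ranges topic_ranges max_index → Spec_normalize_topic_ranges topic_ranges max_index (normalize_topic_ranges topic_ranges max_index)

-- ===== LEMMAS AND PROOFS =====

-- A's cleaning loop and B's cleaning comprehension build the same list
theorem pvCleanA_eq_cleanB (M : Int) (l : List (String × Int × Int)) :
    pvCleanA M l = pvCleanB M l := by
  have h : ∀ (l : List (String × Int × Int)) (acc : List (String × Int × Int)),
      l.foldl (fun acc r =>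
        let s := pvClamp M r.2.1
        let e := pvClamp M r.2.2
        if s > e then acc ++ [(r.1, e, s)] else acc ++ [(r.1, s, e)]) acc
      = acc ++ pvCleanB M l := by
    intro l
    induction l with
    | nil => intro acc; simp [pvCleanB]
    | cons r rest ih =>
      intro acc
      simp only [List.foldl_cons, pvCleanB, List.map_cons]
      rw [ih]
      by_cases hse : pvClamp M r.2.1 > pvClamp M r.2.2
      · simp only [if_pos hse, pvCleanB]
        have h1 : min (pvClamp M r.2.1) (pvClamp M r.2.2) = pvClamp M r.2.2 := by omega
        have h2 : max (pvClamp M r.2.1) (pvClamp M r.2.2) = pvClamp M r.2.1 := by omega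
        simp [h1, h2]
      · simp only [if_neg hse, pvCleanB]
        have h1 : min (pvClamp M r.2.1) (pvClamp M r.2.2) = pvClamp M r.2.1 := by omega
        have h2 : max (pvClamp M r.2.1) (pvClamp M r.2.2) = pvClamp M r.2.2 := by omega
        simp [h1, h2]
  simpa using h l []

-- recursive restatement of B's filter-over-prefix-maxima phase
def pvKeptAux : List (String × Int × Int) → Int → List (String × Int × Int)
  | [], _ => []
  | (t, s, e) :: rest, m =>
    if e > m then (t, max s (m + 1), e) :: pvKeptAux rest e else pvKeptAux rest m

-- recursive restatement of B's zip-with-bounds gap-filling phase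
def pvPhase2 (M : Int) : List (String × Int × Int) → Int → List (String × Int × Int)
  | [], p => if p ≤ M then [(("no_topic" : String), p, M)] else []
  | (t, s, e) :: K, p =>
    (if s > p then [(("no_topic" : String), p, s - 1)] else []) ++ (t, s, e) :: pvPhase2 M K (e + 1)

theorem pvKept_eq_aux (l : List (String × Int × Int)) (m : Int) :
    (l.zip (List.scanl (fun m e => max m e) m (l.map (fun r => r.2.2)))).filterMap
      (fun p => if p.1.2.2 > p.2 then some (p.1.1, max p.1.2.1 (p.2 + 1), p.1.2.2) else none)
    = pvKeptAux l m := by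
  induction l generalizing m with
  | nil => simp [pvKeptAux]
  | cons r rest ih =>
    obtain ⟨t, s, e⟩ := r
    simp only [List.map_cons, List.scanl_cons, List.zip_cons_cons, List.filterMap_cons, pvKeptAux]
    by_cases h : e > m
    · have hmax : max m e = e := by omega
      simp only [if_pos h, hmax, ih]
    · have hmax : max m e = m := by omega
      simp only [if_neg h, hmax, ih]

theorem pvZipBounds_eq_phase2 (M : Int) (K : List (String × Int × Int)) (p : Int) :
    ((K.zip (p :: K.map (fun r => r.2.2 + 1))).flatMap (fun q =>
        (if q.1.2.1 > q.2 then [(("no_topic" : String), q.2, q.1.2.1 - 1)] else []) ++ [q.1])) ++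
      (if (p :: K.map (fun r => r.2.2 + 1)).getLastD 0 ≤ M
       then [(("no_topic" : String), (p :: K.map (fun r => r.2.2 + 1)).getLastD 0, M)] else [])
    = pvPhase2 M K p := by
  induction K generalizing p with
  | nil => simp [pvPhase2]
  | cons r rest ih =>
    obtain ⟨t, s, e⟩ := r
    simp only [List.map_cons, List.zip_cons_cons, List.flatMap_cons, pvPhase2,
      List.getLastD_cons]
    rw [← ih (e + 1)]
    simp only [List.getLastD_cons]
    simp [List.append_assoc]

theorem pvKeptAux_dead (l : List (String × Int × Int)) (m : Int)
    (h : ∀ r ∈ l, r.2.2 ≤ m) : pvKeptAux l m = [] := by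
  induction l generalizing m with
  | nil => rfl
  | cons r rest ih =>
    obtain ⟨t, s, e⟩ := r
    have he : e ≤ m := h (t, s, e) (by simp)
    simp only [pvKeptAux, if_neg (by omega : ¬ e > m)]
    exact ih m (fun r hr => h r (List.mem_cons_of_mem _ hr))

-- the main correspondence: A's sweep from `cur` = gap filling over the surviving blocks
theorem pvLoopA_eq_phase2 (M : Int) (l : List (String × Int × Int)) (cur : Int)
    (hl : ∀ r ∈ l, 0 ≤ r.2.1 ∧ r.2.1 ≤ r.2.2 ∧ r.2.2 ≤ max M 0)
    (hc0 : 0 ≤ cur) (hcN : cur ≤ max M 0) :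
    pvLoopA M l cur = pvPhase2 M (pvKeptAux l (cur - 1)) cur := by
  induction l generalizing cur with
  | nil => simp [pvLoopA, pvKeptAux, pvPhase2]
  | cons r rest ih =>
    obtain ⟨t, s, e⟩ := r
    have hr : 0 ≤ s ∧ s ≤ e ∧ e ≤ max M 0 := hl (t, s, e) (by simp)
    have hrest : ∀ x ∈ rest, 0 ≤ x.2.1 ∧ x.2.1 ≤ x.2.2 ∧ x.2.2 ≤ max M 0 :=
      fun x hx => hl x (List.mem_cons_of_mem _ hx)
    by_cases hskip : e < cur
    · simp only [pvLoopA, if_pos hskip, pvKeptAux, if_neg (by omega : ¬ e > cur - 1)]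
      exact ih cur hrest hc0 hcN
    · -- e ≥ cur : the range survives as (t, max s cur, e)
      have hkeep : e > cur - 1 := by omega
      have hms : max s (cur - 1 + 1) = max s cur := by omega
      simp only [pvLoopA, if_neg hskip, pvKeptAux, if_pos hkeep, hms, pvPhase2]
      by_cases hbreak : e + 1 > M
      · -- A breaks; every remaining range ends not after e, so no block survives
        have heN : e = max M 0 := by omega
        have hdead : pvKeptAux rest e = [] :=
          pvKeptAux_dead rest e (fun x hx => by have := hrest x hx; omega)
        have hmax : max (max s cur) cur = max s cur := by omega
        simp only [if_pos hbreak, hdead, pvPhase2, if_neg (by omega : ¬ e + 1 ≤ M)]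
        by_cases hs : s > cur
        · have : max s cur = s := by omega
          simp [this, hs]
        · have : max s cur = cur := by omega
          simp [this, hs]
      · have hrec := ih (e + 1) hrest (by omega) (by omega)
        have : e + 1 - 1 = e := by omega
        rw [this] at hrec
        simp only [if_neg hbreak, hrec]
        by_cases hs : s > cur
        · have : max s cur = s := by omega
          simp [this, hs]
        · have : max s cur = cur := by omega
          simp [this, hs]

-- ===== VERDICT (by name: the statement is the Claim_ definition above) =====
theorem normalize_topic_ranges_spec : Claim_equal_normalize_topic_ranges := by
  intro topic_ranges max_index _
  unfold Spec_normalize_topic_ranges normalize_topic_ranges normalize_topic_ranges_alt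
  by_cases hnil : topic_ranges = []
  · simp [hnil]
  · simp only [if_neg hnil]
    rw [pvCleanA_eq_cleanB]
    set L := PySem.List.sorted2 (pvCleanB max_index topic_ranges) (fun x => x.2.1) (fun x => x.2.2) with hL
    rw [show pvKept L = pvKeptAux L (-1) from pvKept_eq_aux L (-1)]
    rw [pvZipBounds_eq_phase2 max_index (pvKeptAux L (-1)) 0]
    have hmem : ∀ r ∈ L, 0 ≤ r.2.1 ∧ r.2.1 ≤ r.2.2 ∧ r.2.2 ≤ max max_index 0 := by
      intro r hr
      have : r ∈ pvCleanB max_index topic_ranges := by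
        have hperm := PySem.List.sorted2_perm (xs := pvCleanB max_index topic_ranges)
          (k1 := fun x => x.2.1) (k2 := fun x => x.2.2) (rev := false)
        exact hperm.mem_iff.mp hr
      simp only [pvCleanB, List.mem_map] at this
      obtain ⟨x, _, hx⟩ := this
      subst hx
      simp only [pvClamp]
      omega
    have := pvLoopA_eq_phase2 max_index L 0 hmem (by omega) (by omega)
    rw [show (0 : Int) - 1 = -1 by omega] at this
    exact this
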